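-- pv_equiv track=rewrite | github.com/r-jelly/program-solving | baekjoon/10655.py | solution
-- ===== SOURCE A (Python) =====
-- from typing import List
--
-- def solution(point_list: List[List[int]]):
--     all_dist = 0
--     for i in range(1, len(point_list)):
--         all_dist += abs(
--             point_list[i-1][0] - point_list[i][0]
--         ) + abs(
--             point_list[i-1][1] - point_list[i][1]
--         )
--
--     diff_list = []
--     for i in range(1, len(point_list)-1):
--         prev_x, prev_y = point_list[i-1]
--         cur_x, cur_y = point_list[i]
--         next_x, next_y = point_list[i+1]
--
--         prev_dist = abs(prev_x-cur_x) + abs(prev_y-cur_y)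
--         next_dist = abs(next_x-cur_x) + abs(next_y-cur_y)
--         jump_dist = abs(next_x-prev_x) + abs(next_y-prev_y)
--         diff_list.append(prev_dist+next_dist-jump_dist)
--
--     return all_dist - max(*diff_list, 0)
-- ===== SOURCE B (Python) =====
-- from typing import List
--
-- def solution(point_list: List[List[int]]):
--     # brute force: consider the path as given and every path with one interior
--     # point spliced out, computing each candidate path's length from scratch; return the minimum
--     def path_length(pts):
--         total = 0
--         for (x0, y0), (x1, y1) in zip(pts, pts[1:]):
--             total += abs(x0 - x1) + abs(y0 - y1)
--         return total
--
--     candidates = [path_length(point_list)]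
--     for i in range(1, len(point_list) - 1):
--         candidates.append(path_length(point_list[:i] + point_list[i+1:]))
--     return min(candidates)
-- ===== Notes on version B (the rewrite author's own statement) =====
-- stated objective: alternative
-- what changed: B brute-forces the problem statement: it computes from scratch the full path length of the given list and of each list with one interior point spliced out, and returns the minimum candidate, instead of A's single pass that totals the path and subtracts the maximal local skip-saving.
-- outside the precondition, e.g. on solution([]): A raises TypeError, B returns 0; on solution([[0, 0], [1, 1]]): A raises TypeError, B returns 2
-- crash fix: On inputs with fewer than 3 points, or with a point that is not an [x,y] pair, A raises (TypeError from max(*[],0), IndexError, or ValueError from unpacking); wherever B's own indexing succeeds it returns the minimum candidate path length (0, or the single segment's length). — e.g. on solution([[0,0],[1,1]]): A raises TypeError, B returns 2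
import Mathlib
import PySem

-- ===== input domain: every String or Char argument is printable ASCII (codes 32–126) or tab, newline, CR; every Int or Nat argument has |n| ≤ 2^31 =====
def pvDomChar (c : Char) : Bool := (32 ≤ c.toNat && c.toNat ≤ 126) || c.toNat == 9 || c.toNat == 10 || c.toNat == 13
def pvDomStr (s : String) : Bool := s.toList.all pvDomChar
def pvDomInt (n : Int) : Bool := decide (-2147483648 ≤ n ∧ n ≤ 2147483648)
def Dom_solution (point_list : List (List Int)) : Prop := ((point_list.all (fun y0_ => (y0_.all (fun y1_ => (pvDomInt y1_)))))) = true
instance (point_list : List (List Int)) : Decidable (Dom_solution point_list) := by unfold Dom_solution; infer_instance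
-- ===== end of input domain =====

-- B brute-forces: it recomputes the full path length with each interior point spliced out and
-- takes the minimum candidate, instead of A's total-minus-max-saving pass (objective: alternative).


-- ===== PORT A =====
def solution (point_list : List (List Int)) : Int :=
  let n : Int := point_list.length
  let all_dist : Int := (PySem.List.pyRange 1 n 1).foldl (fun acc i =>
    acc + (|PySem.List.pyGetD (PySem.List.pyGetD point_list (i-1) []) 0 0
           - PySem.List.pyGetD (PySem.List.pyGetD point_list i []) 0 0|
        + |PySem.List.pyGetD (PySem.List.pyGetD point_list (i-1) []) 1 0
           - PySem.List.pyGetD (PySem.List.pyGetD point_list i []) 1 0|)) 0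
  let diff_list : List Int := (PySem.List.pyRange 1 (n-1) 1).foldl (fun ds i =>
    let prev := PySem.List.pyGetD point_list (i-1) []
    let cur := PySem.List.pyGetD point_list i []
    let next := PySem.List.pyGetD point_list (i+1) []
    let prev_dist := |PySem.List.pyGetD prev 0 0 - PySem.List.pyGetD cur 0 0|
                   + |PySem.List.pyGetD prev 1 0 - PySem.List.pyGetD cur 1 0|
    let next_dist := |PySem.List.pyGetD next 0 0 - PySem.List.pyGetD cur 0 0|
                   + |PySem.List.pyGetD next 1 0 - PySem.List.pyGetD cur 1 0|
    let jump_dist := |PySem.List.pyGetD next 0 0 - PySem.List.pyGetD prev 0 0|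
                   + |PySem.List.pyGetD next 1 0 - PySem.List.pyGetD prev 1 0|
    ds ++ [prev_dist + next_dist - jump_dist]) []
  -- max(*diff_list, 0): the maximum of diff_list's elements and 0 (Pre_ makes diff_list nonempty)
  all_dist - diff_list.foldl max 0

-- ===== PORT B =====
-- Source B's helper path_length: sum over zip(pts, pts[1:]) of Manhattan distances
-- (unpacking an [x, y] pair is ported as its two lookups, exact on Pre_'s pair-shaped points)
def pathLength (pts : List (List Int)) : Int :=
  (pts.zip (PySem.List.slice pts (some 1) none)).foldl (fun total ab =>
    total + (|PySem.List.pyGetD ab.1 0 0 - PySem.List.pyGetD ab.2 0 0|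
           + |PySem.List.pyGetD ab.1 1 0 - PySem.List.pyGetD ab.2 1 0|)) 0

-- Python's min() on a list (the empty case is unreachable: candidates starts nonempty)
def pyMinList (l : List Int) : Int :=
  match l with
  | [] => 0
  | c :: rest => rest.foldl min c

def solution_alt (point_list : List (List Int)) : Int :=
  let candidates : List Int :=
    (PySem.List.pyRange 1 ((point_list.length : Int) - 1) 1).foldl (fun cs i =>
      cs ++ [pathLength (PySem.List.slice point_list none (some i)
                          ++ PySem.List.slice point_list (some (i+1)) none)])
      [pathLength point_list]
  pyMinList candidates

-- ===== PRECONDITION & SPEC =====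
-- A raises on fewer than 3 points (max(*[],0) is a TypeError) and on any point that is not an
-- [x, y] pair (IndexError/ValueError from indexing/unpacking); Pre_ admits exactly the rest.
def Pre_solution (point_list : List (List Int)) : Prop :=
  3 ≤ point_list.length ∧ ∀ p ∈ point_list, p.length = 2
instance (point_list : List (List Int)) : Decidable (Pre_solution point_list) := by
  unfold Pre_solution; infer_instance
def pvWitness_solution : List (List Int) := [[0,0],[5,0],[5,5]]

-- On inputs with fewer than 3 points or a point that is not an [x,y] pair A raises (TypeError
-- from max(*[],0), IndexError, or ValueError); wherever B's own indexing succeeds B returns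
-- the minimum candidate path length.
def Raises_solution (point_list : List (List Int)) : Prop :=
  (point_list.length ≤ 2 ∨ ∃ p ∈ point_list, p.length ≠ 2) ∧
  (point_list.length ≤ 1 ∨ ∀ p ∈ point_list, p.length = 2)
instance (point_list : List (List Int)) : Decidable (Raises_solution point_list) := by
  unfold Raises_solution; infer_instance
def pvRaiseWitness_solution : List (List Int) := [[0,0],[1,1]]
def pvRaiseWitnessOut_solution : Int := 2

def Spec_solution (point_list : List (List Int)) (out : Int) : Prop := out = solution_alt point_list
instance (point_list : List (List Int)) (out : Int) : Decidable (Spec_solution point_list out) := by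
  unfold Spec_solution; infer_instance

-- ===== CLAIM (what is proved, stated in full; the proofs are below) =====
def Claim_equal_solution : Prop := ∀ (point_list : List (List Int)),
  Dom_solution point_list → Pre_solution point_list → Spec_solution point_list (solution point_list)
def Claim_raises_solution : Prop :=
  (∀ (point_list : List (List Int)), Dom_solution point_list → Raises_solution point_list →
      ¬ Pre_solution point_list) ∧
  (Dom_solution (pvRaiseWitness_solution) ∧ Raises_solution (pvRaiseWitness_solution) ∧
      solution_alt (pvRaiseWitness_solution) = pvRaiseWitnessOut_solution)

-- ===== LEMMAS AND PROOFS =====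

-- the Manhattan distance both programs compute between two stored points
def pvDist (a b : List Int) : Int :=
  |PySem.List.pyGetD a 0 0 - PySem.List.pyGetD b 0 0|
  + |PySem.List.pyGetD a 1 0 - PySem.List.pyGetD b 1 0|

lemma pvDist_comm (a b : List Int) : pvDist a b = pvDist b a := by
  unfold pvDist; rw [abs_sub_comm, abs_sub_comm (PySem.List.pyGetD a 1 0)]

-- A's per-step distance, as a function of the (1-based) index
def pvG (pl : List (List Int)) (i : Int) : Int :=
  pvDist (PySem.List.pyGetD pl (i-1) []) (PySem.List.pyGetD pl i [])

-- A's skip-saving at interior index i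
def pvDiff (pl : List (List Int)) (i : Int) : Int :=
  let prev := PySem.List.pyGetD pl (i-1) []
  let cur := PySem.List.pyGetD pl i []
  let next := PySem.List.pyGetD pl (i+1) []
  pvDist prev cur + pvDist next cur - pvDist next prev

-- structural-recursion form of the path length
def sumAdj : List (List Int) → Int
  | a :: b :: r => pvDist a b + sumAdj (b :: r)
  | _ => 0

-- the indexed per-step distances ARE the zip-with-tail distances
lemma seg_eq (pl : List (List Int)) :
    (pl.zip pl.tail).map (fun ab => pvDist ab.1 ab.2)
      = (PySem.List.pyRange 1 (pl.length : Int) 1).map (pvG pl) := by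
  apply List.ext_getElem
  · simp only [List.length_map, List.length_zip, List.length_tail,
      PySem.List.length_pyRange_one]
    omega
  · intro k h1 h2
    simp only [List.getElem_map, PySem.List.getElem_pyRange_one]
    have hk : k < pl.length - 1 := by
      simp [PySem.List.length_pyRange_one] at h2; omega
    have hk1 : k + 1 < pl.length := by omega
    have hz : (pl.zip pl.tail)[k]'(by simpa [List.length_tail] using by omega) = (pl[k], pl[k+1]) := by
      rw [List.getElem_zip]
      congr 1
      rw [List.getElem_tail]
    rw [hz]
    unfold pvG pvDist
    have e1 : PySem.List.pyGetD pl ((1 : Int) + k - 1) [] = pl[k] := by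
      rw [PySem.List.pyGetD_of_nonneg _ _ (by omega)]
      have : ((1 : Int) + k - 1).toNat = k := by omega
      rw [this, List.getD_eq_getElem _ _ (by omega)]
    have e2 : PySem.List.pyGetD pl ((1 : Int) + k) [] = pl[k+1] := by
      rw [PySem.List.pyGetD_of_nonneg _ _ (by omega)]
      have : ((1 : Int) + k).toNat = k + 1 := by omega
      rw [this, List.getD_eq_getElem _ _ (by omega)]
    rw [e1, e2]

lemma zip_sumAdj : ∀ pts : List (List Int),
    ((pts.zip pts.tail).map (fun ab => pvDist ab.1 ab.2)).sum = sumAdj pts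
  | [] => by simp [sumAdj]
  | [a] => by simp [sumAdj]
  | a :: b :: r => by
      have ih := zip_sumAdj (b :: r)
      simp only [List.tail_cons, List.zip_cons_cons, List.map_cons, List.sum_cons, sumAdj] at ih ⊢
      rw [ih]

-- both Pythons' distance-summing loop computes sumAdj
lemma fold_dist_eq (pts : List (List Int)) :
    (PySem.List.pyRange 1 (pts.length : Int) 1).foldl (fun acc i =>
      acc + (|PySem.List.pyGetD (PySem.List.pyGetD pts (i-1) []) 0 0
           - PySem.List.pyGetD (PySem.List.pyGetD pts i []) 0 0|
        + |PySem.List.pyGetD (PySem.List.pyGetD pts (i-1) []) 1 0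
           - PySem.List.pyGetD (PySem.List.pyGetD pts i []) 1 0|)) 0 = sumAdj pts := by
  rw [PySem.List.foldl_congr_mem _ _ (fun acc i => acc + pvG pts i) 0
      (by intro acc i _; simp only [pvG, pvDist]),
    PySem.List.foldl_add, zero_add, ← seg_eq, zip_sumAdj]

lemma pathLength_eq (pts : List (List Int)) : pathLength pts = sumAdj pts := by
  unfold pathLength
  rw [PySem.List.slice_from_one,
    PySem.List.foldl_congr_mem _ _ (fun acc ab => acc + pvDist ab.1 ab.2) 0
      (by intro acc ab _; simp only [pvDist]),
    PySem.List.foldl_add, zero_add, zip_sumAdj]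

-- splicing out index k changes sumAdj by exactly the local skip-saving
lemma sumAdj_remove : ∀ (k : Nat) (pts : List (List Int)), 1 ≤ k → k + 1 < pts.length →
    sumAdj (pts.take k ++ pts.drop (k+1)) =
      sumAdj pts - (pvDist (pts.getD (k-1) []) (pts.getD k [])
                  + pvDist (pts.getD (k+1) []) (pts.getD k [])
                  - pvDist (pts.getD (k+1) []) (pts.getD (k-1) []))
  | 0, _, h1, _ => by omega
  | 1, [], _, h2 => by simp at h2
  | 1, [a], _, h2 => by simp at h2
  | 1, [a, b], _, h2 => by simp at h2
  | 1, a :: b :: c :: r, _, _ => by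
      simp only [List.take_succ_cons, List.take_zero, List.drop_succ_cons, List.drop_zero,
        List.cons_append, List.nil_append, sumAdj, List.getD_cons_succ, List.getD_cons_zero,
        show (1:Nat) - 1 = 0 from rfl]
      rw [pvDist_comm c b, pvDist_comm c a]
      ring
  | (m+2), [], _, h2 => by simp at h2
  | (m+2), [a], _, h2 => by simp at h2
  | (m+2), a :: b :: tl', _, h2 => by
      have ihm := sumAdj_remove (m+1) (b :: tl') (by omega)
        (by simp only [List.length_cons] at h2 ⊢; omega)
      simp only [List.take_succ_cons, List.drop_succ_cons, List.cons_append, sumAdj,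
        List.getD_cons_succ, Nat.add_sub_cancel] at ihm ⊢
      have e : m + 2 - 1 = m + 1 := by omega
      rw [e, List.getD_cons_succ, ihm]
      ring

-- A's saving expression, re-indexed through Nat getD
lemma pvDiff_eq (pl : List (List Int)) (i : Int) (h : 1 ≤ i) :
    pvDiff pl i = pvDist (pl.getD (i.toNat-1) []) (pl.getD i.toNat [])
                + pvDist (pl.getD (i.toNat+1) []) (pl.getD i.toNat [])
                - pvDist (pl.getD (i.toNat+1) []) (pl.getD (i.toNat-1) []) := by
  unfold pvDiff
  rw [PySem.List.pyGetD_of_nonneg _ _ (show (0:Int) ≤ i - 1 by omega),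
    PySem.List.pyGetD_of_nonneg _ _ (show (0:Int) ≤ i by omega),
    PySem.List.pyGetD_of_nonneg _ _ (show (0:Int) ≤ i + 1 by omega)]
  have e1 : (i - 1).toNat = i.toNat - 1 := by omega
  have e2 : (i + 1).toNat = i.toNat + 1 := by omega
  rw [e1, e2]

-- min over (a - d) candidates versus a - max
lemma foldl_min_max : ∀ (l : List Int) (a m : Int),
    (l.map (fun d => a - d)).foldl min (a - m) = a - l.foldl max m
  | [], _, _ => by simp
  | d :: t, a, m => by
      simp only [List.map_cons, List.foldl_cons]
      rw [show min (a - m) (a - d) = a - max m d by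
        rcases le_total m d with h | h
        · rw [max_eq_right h, min_eq_right (by omega)]
        · rw [max_eq_left h, min_eq_left (by omega)]]
      exact foldl_min_max t a (max m d)

lemma foldl_min_sub (l : List Int) (a : Int) :
    (l.map (fun d => a - d)).foldl min a = a - l.foldl max 0 := by
  have h := foldl_min_max l a 0
  rwa [sub_zero] at h

-- ===== VERDICT (by name: the statement is the Claim_ definition above) =====
theorem solution_spec : Claim_equal_solution := by
  intro pl _ _
  unfold Spec_solution
  simp only [solution, solution_alt]
  rw [PySem.List.foldl_append_singleton_eq_map, List.nil_append,
    PySem.List.foldl_append_singleton_eq_map, List.singleton_append]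
  rw [fold_dist_eq, pathLength_eq]
  simp only [pyMinList]
  have hmap : (PySem.List.pyRange 1 ((pl.length : Int) - 1) 1).map (fun i =>
      pathLength (PySem.List.slice pl none (some i) ++ PySem.List.slice pl (some (i+1)) none))
      = (PySem.List.pyRange 1 ((pl.length : Int) - 1) 1).map (fun i => sumAdj pl - pvDiff pl i) := by
    apply List.map_congr_left
    intro i hi
    rw [PySem.List.mem_pyRange_one] at hi
    rw [PySem.List.slice_to pl (by omega), PySem.List.slice_from pl (by omega),
      show (i + 1).toNat = i.toNat + 1 by omega, pathLength_eq,
      sumAdj_remove i.toNat pl (by omega) (by omega), pvDiff_eq pl i hi.1]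
  rw [hmap, show (fun i => sumAdj pl - pvDiff pl i)
        = (fun d => sumAdj pl - d) ∘ pvDiff pl from rfl,
    ← List.map_map, foldl_min_sub]
  congr 1

-- solution_raises is the crash-fix verdict (read by the grader by name)
def solution_raises : Claim_raises_solution := by
  unfold Claim_raises_solution
  constructor
  · intro pl _ hr hp
    obtain ⟨h3, hall⟩ := hp
    rcases hr.1 with h | ⟨p, hm, hne⟩
    · omega
    · exact hne (hall p hm)
  · exact ⟨by decide, by decide, by decide⟩
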